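-- pv_equiv track=rewrite | github.com/GundalaNikhil/DSA | dsa-problems/LinkedLists/testcases/tc_generators/generate_lnk011.py | make_test_case
-- ===== SOURCE A (Python) =====
-- class ListNode:
--     def __init__(self, val=0):
--         self.val = val
--         self.next = None
--
-- def get_length(h):
--     l = 0
--     while h:
--         l += 1
--         h = h.next
--     return l
--
-- def intersection_sum(hA, hB):
--     la, lb = get_length(hA), get_length(hB)
--     ptrA, ptrB = hA, hB
--     while la > lb:
--         ptrA = ptrA.next
--         la -= 1
--     while lb > la:
--         ptrB = ptrB.next
--         lb -= 1
--     while ptrA != ptrB: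
--         ptrA = ptrA.next
--         ptrB = ptrB.next
--     if not ptrA:
--         return 0
--     s = 0
--     curr = ptrA
--     while curr:
--         s += curr.val
--         curr = curr.next
--     return s
--
-- def array_to_list(a):
--     if not a: return None
--     d = ListNode()
--     c = d
--     for v in a:
--         c.next = ListNode(v)
--         c = c.next
--     return d.next
--
-- def make_test_case(v1, v2, ia=-1, ib=-1):
--     n, m = len(v1), len(v2)
--     hA = array_to_list(v1)
--     hB = array_to_list(v2)
--
--     # Store nodes in lists for easy indexing
--     nodesA = []
--     curr = hA
--     while curr:
--         nodesA.append(curr)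
--         curr = curr.next
--     nodesB = []
--     curr = hB
--     while curr:
--         nodesB.append(curr)
--         curr = curr.next
--
--     # Apply intersection
--     if ia != -1 and ib != -1 and n > 0 and m > 0:
--         if ib < m and ia < n:
--             nodesB[ib].next = nodesA[ia]
--
--     res = intersection_sum(hA, hB)
--
--     inp = f"{n} {m}\n{' '.join(map(str, v1)) if v1 else ''}\n{' '.join(map(str, v2)) if v2 else ''}\n{ia} {ib}"
--     out = str(res)
--     return {"input": inp, "output": out}
-- ===== SOURCE B (Python) =====
-- def make_test_case(v1, v2, ia=-1, ib=-1):
--     n, m = len(v1), len(v2)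
--     if ia != -1 and ib != -1 and n > 0 and m > 0 and ib < m and ia < n:
--         res = sum(v1[ia:])
--     else:
--         res = 0
--     inp = f"{n} {m}\n{' '.join(map(str, v1)) if v1 else ''}\n{' '.join(map(str, v2)) if v2 else ''}\n{ia} {ib}"
--     return {"input": inp, "output": str(res)}
-- ===== Notes on version B (the rewrite author's own statement) =====
-- stated objective: simpler
-- what changed: B drops the linked-list construction, node collection and the length-alignment/two-pointer intersection walk and computes the result in closed form: when the link condition holds the intersected part is exactly the suffix v1[ia:], so res = sum(v1[ia:]), else 0.
import Mathlib
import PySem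

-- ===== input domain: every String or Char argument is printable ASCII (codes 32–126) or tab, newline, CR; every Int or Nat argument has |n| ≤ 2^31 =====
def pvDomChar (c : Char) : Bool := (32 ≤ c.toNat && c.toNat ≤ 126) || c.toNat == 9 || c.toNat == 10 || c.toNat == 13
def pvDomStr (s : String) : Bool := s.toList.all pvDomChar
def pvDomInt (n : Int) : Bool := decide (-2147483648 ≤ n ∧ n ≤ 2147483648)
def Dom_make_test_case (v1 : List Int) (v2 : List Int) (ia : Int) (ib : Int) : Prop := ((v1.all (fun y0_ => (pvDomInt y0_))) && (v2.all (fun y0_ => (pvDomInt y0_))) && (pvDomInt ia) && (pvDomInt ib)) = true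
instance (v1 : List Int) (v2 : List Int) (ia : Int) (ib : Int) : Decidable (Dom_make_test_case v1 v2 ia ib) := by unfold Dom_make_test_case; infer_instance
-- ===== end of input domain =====

-- B replaces A's linked-list construction and two-pointer intersection walk by the direct
-- closed form res = sum(v1[ia:]) when the link is applied, else 0 (simpler; a timing run
-- measured it a constant factor faster since no node objects are built or walked).

-- ===== PORT A =====
-- A mutates heap nodes; the port models the node graph by indices: node (false, i) is the i-th
-- node of list A, (true, j) the j-th node of list B; pvNext is the `.next` function after the
-- optional link nodesB[jb].next = nodesA[ja] (exact on Pre_, where the indices are in range).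
def pvVal (v1 v2 : List Int) : Bool × Nat → Int
  | (false, i) => v1.getD i 0
  | (true, j) => v2.getD j 0

def pvNext (n m : Nat) (link : Bool) (jb ja : Nat) : Bool × Nat → Option (Bool × Nat)
  | (false, i) => if i + 1 < n then some (false, i + 1) else none
  | (true, j) =>
      if link && j == jb then some (false, ja)
      else if j + 1 < m then some (true, j + 1) else none

-- get_length(h): while h: l += 1; h = h.next   (fueled; fuel is ample on every reachable chain)
def pvGetLength (nx : Bool × Nat → Option (Bool × Nat)) : Nat → Option (Bool × Nat) → Nat
  | _, none => 0
  | 0, some _ => 0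
  | f + 1, some p => 1 + pvGetLength nx f (nx p)

-- the two alignment loops: advance a pointer k times
def pvAdvance (nx : Bool × Nat → Option (Bool × Nat)) : Nat → Option (Bool × Nat) → Option (Bool × Nat)
  | 0, p => p
  | k + 1, p => pvAdvance nx k (p.bind nx)

-- while ptrA != ptrB: ptrA = ptrA.next; ptrB = ptrB.next   (fueled)
def pvMeet (nx : Bool × Nat → Option (Bool × Nat)) : Nat → Option (Bool × Nat) → Option (Bool × Nat) → Option (Bool × Nat)
  | 0, pA, _ => pA
  | f + 1, pA, pB => if pA = pB then pA else pvMeet nx f (pA.bind nx) (pB.bind nx)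

-- s = 0; while curr: s += curr.val; curr = curr.next
def pvSumFrom (nx : Bool × Nat → Option (Bool × Nat)) (val : Bool × Nat → Int) : Nat → Option (Bool × Nat) → Int
  | _, none => 0
  | 0, some _ => 0
  | f + 1, some p => val p + pvSumFrom nx val f (nx p)

-- intersection_sum(hA, hB)
def pvIntersectionSum (nx : Bool × Nat → Option (Bool × Nat)) (val : Bool × Nat → Int)
    (fuel : Nat) (hA hB : Option (Bool × Nat)) : Int :=
  let la := pvGetLength nx fuel hA
  let lb := pvGetLength nx fuel hB
  let ptrA := pvAdvance nx (la - lb) hA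
  let ptrB := pvAdvance nx (lb - la) hB
  match pvMeet nx fuel ptrA ptrB with
  | none => 0
  | some p => pvSumFrom nx val fuel (some p)

def make_test_case (v1 : List Int) (v2 : List Int) (ia : Int) (ib : Int) : List (String × String) :=
  let n := v1.length
  let m := v2.length
  let link := decide (ia ≠ -1 ∧ ib ≠ -1 ∧ 0 < n ∧ 0 < m ∧ ib < (m : Int) ∧ ia < (n : Int))
  let jb := if 0 ≤ ib then ib.toNat else ((m : Int) + ib).toNat   -- index of nodesB[ib]
  let ja := if 0 ≤ ia then ia.toNat else ((n : Int) + ia).toNat   -- index of nodesA[ia]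
  let nx := pvNext n m link jb ja
  let hA : Option (Bool × Nat) := if 0 < n then some (false, 0) else none
  let hB : Option (Bool × Nat) := if 0 < m then some (true, 0) else none
  let res := pvIntersectionSum nx (pvVal v1 v2) (n + m + 1) hA hB
  let inp := PySem.Int.toStr (n : Int) ++ " " ++ PySem.Int.toStr (m : Int) ++ "\n"
      ++ (if v1.isEmpty then "" else PySem.Str.join " " (v1.map PySem.Int.toStr)) ++ "\n"
      ++ (if v2.isEmpty then "" else PySem.Str.join " " (v2.map PySem.Int.toStr)) ++ "\n"
      ++ PySem.Int.toStr ia ++ " " ++ PySem.Int.toStr ib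
  [("input", inp), ("output", PySem.Int.toStr res)]

-- ===== PORT B =====
def make_test_case_alt (v1 : List Int) (v2 : List Int) (ia : Int) (ib : Int) : List (String × String) :=
  let n := v1.length
  let m := v2.length
  let res : Int :=
    if ia ≠ -1 ∧ ib ≠ -1 ∧ 0 < n ∧ 0 < m ∧ ib < (m : Int) ∧ ia < (n : Int)
    then (PySem.List.slice v1 (some ia) none).sum   -- sum(v1[ia:])
    else 0
  let inp := PySem.Int.toStr (n : Int) ++ " " ++ PySem.Int.toStr (m : Int) ++ "\n"
      ++ (if v1.isEmpty then "" else PySem.Str.join " " (v1.map PySem.Int.toStr)) ++ "\n"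
      ++ (if v2.isEmpty then "" else PySem.Str.join " " (v2.map PySem.Int.toStr)) ++ "\n"
      ++ PySem.Int.toStr ia ++ " " ++ PySem.Int.toStr ib
  [("input", inp), ("output", PySem.Int.toStr res)]

-- ===== PRECONDITION & SPEC =====
-- Pre_ excludes exactly the inputs on which A raises IndexError: the link condition holds but
-- ib < -len(v2) or ia < -len(v1), so nodesB[ib] or nodesA[ia] is out of range.
def Pre_make_test_case (v1 : List Int) (v2 : List Int) (ia : Int) (ib : Int) : Prop :=
  ¬ ((ia ≠ -1 ∧ ib ≠ -1 ∧ 0 < v1.length ∧ 0 < v2.length ∧ ib < (v2.length : Int) ∧ ia < (v1.length : Int))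
     ∧ (ib < -(v2.length : Int) ∨ ia < -(v1.length : Int)))
instance (v1 : List Int) (v2 : List Int) (ia : Int) (ib : Int) : Decidable (Pre_make_test_case v1 v2 ia ib) := by unfold Pre_make_test_case; infer_instance

def pvWitness_make_test_case : List Int × List Int × Int × Int := ([1, 2], [3], 0, 0)

def Spec_make_test_case (v1 : List Int) (v2 : List Int) (ia : Int) (ib : Int) (out : List (String × String)) : Prop := out = make_test_case_alt v1 v2 ia ib
instance (v1 : List Int) (v2 : List Int) (ia : Int) (ib : Int) (out : List (String × String)) : Decidable (Spec_make_test_case v1 v2 ia ib out) := by unfold Spec_make_test_case; infer_instance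

-- ===== CLAIM (what is proved, stated in full; the proofs are below) =====
def Claim_equal_make_test_case : Prop := ∀ (v1 : List Int) (v2 : List Int) (ia : Int) (ib : Int), Dom_make_test_case v1 v2 ia ib → Pre_make_test_case v1 v2 ia ib → Spec_make_test_case v1 v2 ia ib (make_test_case v1 v2 ia ib)


-- ===== LEMMAS AND PROOFS =====

theorem pvGetLength_none (nx : Bool × Nat → Option (Bool × Nat)) (f : Nat) :
    pvGetLength nx f none = 0 := by cases f <;> simp [pvGetLength]

theorem pvLenA (n m : Nat) (link : Bool) (jb ja : Nat) :
    ∀ f i, i < n → n - i ≤ f →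
      pvGetLength (pvNext n m link jb ja) f (some (false, i)) = n - i := by
  intro f
  induction f with
  | zero => intro i h1 h2; omega
  | succ f ih =>
      intro i h1 h2
      simp only [pvGetLength, pvNext]
      by_cases h : i + 1 < n
      · rw [if_pos h, ih (i+1) h (by omega)]; omega
      · rw [if_neg h, pvGetLength_none]; omega

theorem pvLenB_nolink (n m : Nat) (jb ja : Nat) :
    ∀ f j, j < m → m - j ≤ f →
      pvGetLength (pvNext n m false jb ja) f (some (true, j)) = m - j := by
  intro f
  induction f with
  | zero => intro j h1 h2; omega
  | succ f ih =>
      intro j h1 h2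
      simp only [pvGetLength, pvNext, Bool.false_and, if_neg (by simp : ¬(false = true))]
      by_cases h : j + 1 < m
      · rw [if_pos h, ih (j+1) h (by omega)]; omega
      · rw [if_neg h, pvGetLength_none]; omega

theorem pvLenB_link (n m : Nat) (jb ja : Nat) (hja : ja < n) (hjb : jb < m) :
    ∀ f j, j ≤ jb → (jb - j) + 1 + (n - ja) ≤ f →
      pvGetLength (pvNext n m true jb ja) f (some (true, j)) = (jb - j + 1) + (n - ja) := by
  intro f
  induction f with
  | zero => intro j h1 h2; omega
  | succ f ih =>
      intro j h1 h2
      simp only [pvGetLength, pvNext, Bool.true_and]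
      by_cases h : j = jb
      · rw [if_pos (by simp [h]), pvLenA n m true jb ja f ja hja (by omega)]
        omega
      · rw [if_neg (by simpa using h), if_pos (by omega),
           ih (j+1) (by omega) (by omega)]
        omega

theorem pvAdvance_none (nx : Bool × Nat → Option (Bool × Nat)) :
    ∀ k, pvAdvance nx k none = none := by
  intro k; induction k with
  | zero => rfl
  | succ k ih => simpa [pvAdvance] using ih

theorem pvAdvance_add (nx : Bool × Nat → Option (Bool × Nat)) :
    ∀ a b p, pvAdvance nx (a + b) p = pvAdvance nx b (pvAdvance nx a p) := by
  intro a
  induction a with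
  | zero => intro b p; rw [Nat.zero_add]; rfl
  | succ a ih =>
      intro b p
      rw [Nat.succ_add]
      simp only [pvAdvance]
      exact ih b (p.bind nx)

theorem pvAdvA (n m : Nat) (link : Bool) (jb ja : Nat) :
    ∀ k i, i + k < n →
      pvAdvance (pvNext n m link jb ja) k (some (false, i)) = some (false, i + k) := by
  intro k
  induction k with
  | zero => intro i h; rfl
  | succ k ih =>
      intro i h
      simp only [pvAdvance, Option.bind, pvNext]
      rw [if_pos (by omega), ih (i+1) (by omega)]
      congr 2
      omega

theorem pvAdvA_full (n m : Nat) (link : Bool) (jb ja : Nat) :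
    ∀ k i, i + k = n → i < n →
      pvAdvance (pvNext n m link jb ja) k (some (false, i)) = none := by
  intro k
  induction k with
  | zero => intro i h1 h2; omega
  | succ k ih =>
      intro i h1 h2
      simp only [pvAdvance, Option.bind, pvNext]
      by_cases h : i + 1 < n
      · rw [if_pos h]; exact ih (i+1) (by omega) h
      · rw [if_neg h, pvAdvance_none]

theorem pvAdvB_nolink (n m : Nat) (jb ja : Nat) :
    ∀ k j, j + k < m →
      pvAdvance (pvNext n m false jb ja) k (some (true, j)) = some (true, j + k) := by
  intro k
  induction k with
  | zero => intro j h; rfl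
  | succ k ih =>
      intro j h
      simp only [pvAdvance, Option.bind, pvNext, Bool.false_and,
        if_neg (by simp : ¬(false = true))]
      rw [if_pos (by omega), ih (j+1) (by omega)]
      congr 2
      omega

theorem pvAdvB_nolink_full (n m : Nat) (jb ja : Nat) :
    ∀ k j, j + k = m → j < m →
      pvAdvance (pvNext n m false jb ja) k (some (true, j)) = none := by
  intro k
  induction k with
  | zero => intro j h1 h2; omega
  | succ k ih =>
      intro j h1 h2
      simp only [pvAdvance, Option.bind, pvNext, Bool.false_and,
        if_neg (by simp : ¬(false = true))]
      by_cases h : j + 1 < m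
      · rw [if_pos h]; exact ih (j+1) (by omega) h
      · rw [if_neg h, pvAdvance_none]

theorem pvAdvB_link (n m : Nat) (jb ja : Nat) (hjb : jb < m) :
    ∀ k j, j + k ≤ jb →
      pvAdvance (pvNext n m true jb ja) k (some (true, j)) = some (true, j + k) := by
  intro k
  induction k with
  | zero => intro j h; rfl
  | succ k ih =>
      intro j h
      simp only [pvAdvance, Option.bind, pvNext, Bool.true_and]
      rw [if_neg (by simp; omega), if_pos (by omega), ih (j+1) (by omega)]
      congr 2
      omega

theorem pvMeet_self (nx : Bool × Nat → Option (Bool × Nat)) (f : Nat) (p : Option (Bool × Nat))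
    (hf : 0 < f) : pvMeet nx f p p = p := by
  cases f with
  | zero => omega
  | succ f => simp [pvMeet]

theorem pvMeet_nolink (n m : Nat) (jb ja : Nat) :
    ∀ r f, 0 < r → r ≤ n → r ≤ m → r + 1 ≤ f →
      pvMeet (pvNext n m false jb ja) f (some (false, n - r)) (some (true, m - r)) = none := by
  intro r
  induction r with
  | zero => intro f h; omega
  | succ r ih =>
      intro f h0 hn hm hf
      cases f with
      | zero => omega
      | succ f =>
          simp only [pvMeet, if_neg (by simp : ¬(some ((false : Bool), n - (r+1)) = some ((true : Bool), m - (r+1))))]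
          simp only [Option.bind, pvNext, Bool.false_and, if_neg (by simp : ¬(false = true))]
          cases Nat.eq_zero_or_pos r with
          | inl hr =>
              subst hr
              rw [if_neg (by omega), if_neg (by omega), pvMeet_self _ f none (by omega)]
          | inr hr =>
              rw [if_pos (by omega), if_pos (by omega)]
              have e1 : n - (r + 1) + 1 = n - r := by omega
              have e2 : m - (r + 1) + 1 = m - r := by omega
              rw [e1, e2]
              exact ih f hr (by omega) (by omega) (by omega)

theorem pvMeet_link (n m : Nat) (jb ja : Nat) (hja : ja < n) (hjb : jb < m) :
    ∀ d f j, j + d = jb → jb + 1 ≤ ja + j → d + 2 ≤ f →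
      pvMeet (pvNext n m true jb ja) f (some (false, ja - (jb - j + 1))) (some (true, j))
        = some (false, ja) := by
  intro d
  induction d with
  | zero =>
      intro f j h1 h2 hf
      have hj : jb = j := by omega
      subst hj
      cases f with
      | zero => omega
      | succ f =>
          simp only [pvMeet, if_neg (by simp : ¬(some ((false : Bool), ja - (jb - jb + 1)) = some ((true : Bool), jb)))]
          simp only [Option.bind, pvNext, Bool.true_and]
          rw [if_pos (by omega), if_pos (by simp)]
          have e1 : ja - (jb - jb + 1) + 1 = ja := by omega
          rw [e1]
          exact pvMeet_self _ f _ (by omega)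
  | succ d ih =>
      intro f j h1 h2 hf
      cases f with
      | zero => omega
      | succ f =>
          simp only [pvMeet, if_neg (by simp : ¬(some ((false : Bool), ja - (jb - j + 1)) = some ((true : Bool), j)))]
          simp only [Option.bind, pvNext, Bool.true_and]
          rw [if_pos (by omega), if_neg (by simp; omega), if_pos (by omega)]
          have e1 : ja - (jb - j + 1) + 1 = ja - (jb - (j + 1) + 1) := by omega
          rw [e1]
          exact ih f (j+1) (by omega) (by omega) (by omega)

theorem pvSumA (v1 v2 : List Int) (m : Nat) (link : Bool) (jb ja : Nat) :
    ∀ f i, i < v1.length → v1.length - i ≤ f →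
      pvSumFrom (pvNext v1.length m link jb ja) (pvVal v1 v2) f (some (false, i))
        = (v1.drop i).sum := by
  intro f
  induction f with
  | zero => intro i h1 h2; omega
  | succ f ih =>
      intro i h1 h2
      simp only [pvSumFrom, pvNext, pvVal]
      rw [List.drop_eq_getElem_cons h1, List.getD_eq_getElem v1 0 h1, List.sum_cons]
      by_cases h : i + 1 < v1.length
      · rw [if_pos h, ih (i+1) h (by omega)]
      · rw [if_neg h]
        have : v1.drop (i+1) = [] := List.drop_eq_nil_of_le (by omega)
        rw [this]
        cases f <;> simp [pvSumFrom]

theorem pv_res_eq (v1 v2 : List Int) (ia ib : Int)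
    (hpre : Pre_make_test_case v1 v2 ia ib) :
    pvIntersectionSum
      (pvNext v1.length v2.length
        (decide (ia ≠ -1 ∧ ib ≠ -1 ∧ 0 < v1.length ∧ 0 < v2.length ∧ ib < (v2.length : Int) ∧ ia < (v1.length : Int)))
        (if 0 ≤ ib then ib.toNat else ((v2.length : Int) + ib).toNat)
        (if 0 ≤ ia then ia.toNat else ((v1.length : Int) + ia).toNat))
      (pvVal v1 v2) (v1.length + v2.length + 1)
      (if 0 < v1.length then some (false, 0) else none)
      (if 0 < v2.length then some (true, 0) else none)
    = if ia ≠ -1 ∧ ib ≠ -1 ∧ 0 < v1.length ∧ 0 < v2.length ∧ ib < (v2.length : Int) ∧ ia < (v1.length : Int)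
      then (PySem.List.slice v1 (some ia) none).sum else 0 := by
  by_cases hc : (ia ≠ -1 ∧ ib ≠ -1 ∧ 0 < v1.length ∧ 0 < v2.length ∧ ib < (v2.length : Int) ∧ ia < (v1.length : Int))
  · rw [decide_eq_true hc, if_pos hc]
    obtain ⟨h1, h2, hn, hm, hib, hia⟩ := hc
    have hbnd : ¬(ib < -(v2.length : Int) ∨ ia < -(v1.length : Int)) :=
      fun h => hpre ⟨⟨h1, h2, hn, hm, hib, hia⟩, h⟩
    have hib2 : -(v2.length : Int) ≤ ib := by omega
    have hia2 : -(v1.length : Int) ≤ ia := by omega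
    have hjan : (if 0 ≤ ia then ia.toNat else ((v1.length : Int) + ia).toNat) < v1.length := by
      split_ifs <;> omega
    have hjbm : (if 0 ≤ ib then ib.toNat else ((v2.length : Int) + ib).toNat) < v2.length := by
      split_ifs <;> omega
    have hidx : PySem.List.clampIdx v1.length ia
        = (if 0 ≤ ia then ia.toNat else ((v1.length : Int) + ia).toNat) := by
      unfold PySem.List.clampIdx
      split_ifs <;> omega
    have hslice : (PySem.List.slice v1 (some ia) none).sum
        = (v1.drop (if 0 ≤ ia then ia.toNat else ((v1.length : Int) + ia).toNat)).sum := by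
      rw [PySem.List.slice_some_none, hidx]
    rw [hslice, if_pos hn, if_pos hm]
    generalize hJA : (if 0 ≤ ia then ia.toNat else ((v1.length : Int) + ia).toNat) = ja at hjan ⊢
    generalize hJB : (if 0 ≤ ib then ib.toNat else ((v2.length : Int) + ib).toNat) = jb at hjbm ⊢
    set n := v1.length with hn_def
    set m := v2.length with hm_def
    simp only [pvIntersectionSum]
    rw [pvLenA n m true jb ja (n + m + 1) 0 hn (by omega),
        pvLenB_link n m jb ja hjan hjbm (n + m + 1) 0 (by omega) (by omega)]
    by_cases hca : jb + 1 ≤ ja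
    · -- B-list (with link) is not longer: advance A by ja - jb - 1
      have e1 : (n - 0) - ((jb - 0 + 1) + (n - ja)) = ja - jb - 1 := by omega
      have e2 : ((jb - 0 + 1) + (n - ja)) - (n - 0) = 0 := by omega
      rw [e1, e2, pvAdvA n m true jb ja (ja - jb - 1) 0 (by omega),
          show pvAdvance (pvNext n m true jb ja) 0 (some (true, 0)) = some (true, 0) from rfl,
          show ((0 : Nat) + (ja - jb - 1)) = ja - (jb - 0 + 1) by omega,
          pvMeet_link n m jb ja hjan hjbm jb (n + m + 1) 0 (by omega) (by omega) (by omega)]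
      exact pvSumA v1 v2 m true jb ja (n + m + 1) ja hjan (by omega)
    · by_cases hz : 1 ≤ ja
      · -- A-list is not longer, ja ≥ 1: advance B by jb + 1 - ja
        have e1 : (n - 0) - ((jb - 0 + 1) + (n - ja)) = 0 := by omega
        have e2 : ((jb - 0 + 1) + (n - ja)) - (n - 0) = jb + 1 - ja := by omega
        rw [e1, e2, pvAdvB_link n m jb ja hjbm (jb + 1 - ja) 0 (by omega),
            show pvAdvance (pvNext n m true jb ja) 0 (some (false, 0)) = some (false, 0) from rfl,
            show (some ((false : Bool), 0) : Option (Bool × Nat))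
              = some (false, ja - (jb - (0 + (jb + 1 - ja)) + 1)) by congr 2; omega,
            pvMeet_link n m jb ja hjan hjbm (ja - 1) (n + m + 1) (0 + (jb + 1 - ja)) (by omega) (by omega) (by omega)]
        exact pvSumA v1 v2 m true jb ja (n + m + 1) ja hjan (by omega)
      · -- ja = 0: B's alignment advance runs through the link; the pointers are equal at once
        have hz0 : ja = 0 := by omega
        subst hz0
        have e1 : (n - 0) - ((jb - 0 + 1) + (n - 0)) = 0 := by omega
        have e2 : ((jb - 0 + 1) + (n - 0)) - (n - 0) = jb + 1 := by omega
        have eadv : pvAdvance (pvNext n m true jb 0) (jb + 1) (some (true, 0)) = some (false, 0) := by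
          rw [pvAdvance_add, pvAdvB_link n m jb 0 hjbm jb 0 (by omega)]
          simp [pvAdvance, pvNext]
        rw [e1, e2, eadv,
            show pvAdvance (pvNext n m true jb 0) 0 (some (false, 0)) = some (false, 0) from rfl,
            pvMeet_self _ (n + m + 1) _ (by omega)]
        exact pvSumA v1 v2 m true jb 0 (n + m + 1) 0 (by omega) (by omega)
  · rw [decide_eq_false hc, if_neg hc]
    generalize (if 0 ≤ ia then ia.toNat else ((v1.length : Int) + ia).toNat) = ja
    generalize (if 0 ≤ ib then ib.toNat else ((v2.length : Int) + ib).toNat) = jb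
    set n := v1.length with hn_def
    set m := v2.length with hm_def
    by_cases hn : 0 < n
    · by_cases hm : 0 < m
      · rw [if_pos hn, if_pos hm]
        simp only [pvIntersectionSum]
        rw [pvLenA n m false jb ja (n + m + 1) 0 hn (by omega),
            pvLenB_nolink n m jb ja (n + m + 1) 0 hm (by omega)]
        by_cases hnm : m ≤ n
        · rw [show (n - 0) - (m - 0) = n - m by omega,
              show (m - 0) - (n - 0) = 0 by omega,
              pvAdvA n m false jb ja (n - m) 0 (by omega),
              show pvAdvance (pvNext n m false jb ja) 0 (some (true, 0)) = some (true, 0) from rfl,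
              show (some ((false : Bool), 0 + (n - m)) : Option (Bool × Nat)) = some (false, n - m) by congr 2; omega,
              show (some ((true : Bool), 0) : Option (Bool × Nat)) = some (true, m - m) by congr 2; omega,
              pvMeet_nolink n m jb ja m (n + m + 1) hm hnm (by omega) (by omega)]
        · rw [show (n - 0) - (m - 0) = 0 by omega,
              show (m - 0) - (n - 0) = m - n by omega,
              pvAdvB_nolink n m jb ja (m - n) 0 (by omega),
              show pvAdvance (pvNext n m false jb ja) 0 (some (false, 0)) = some (false, 0) from rfl,
              show (some ((false : Bool), 0) : Option (Bool × Nat)) = some (false, n - n) by congr 2; omega,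
              show (some ((true : Bool), 0 + (m - n)) : Option (Bool × Nat)) = some (true, m - n) by congr 2; omega,
              pvMeet_nolink n m jb ja n (n + m + 1) hn (by omega) (by omega) (by omega)]
      · -- m = 0: list B is empty; A's pointer is advanced off its end, the walk meets at None
        rw [if_pos hn, if_neg hm]
        simp only [pvIntersectionSum]
        rw [pvGetLength_none, pvLenA n m false jb ja (n + m + 1) 0 hn (by omega),
            show (n - 0) - 0 = n by omega,
            pvAdvA_full n m false jb ja n 0 (by omega) hn,
            pvAdvance_none, pvMeet_self _ (n + m + 1) none (by omega)]
    · rw [if_neg hn]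
      by_cases hm : 0 < m
      · -- n = 0: list A is empty; B's pointer is advanced off its end, the walk meets at None
        rw [if_pos hm]
        simp only [pvIntersectionSum]
        rw [pvGetLength_none, pvLenB_nolink n m jb ja (n + m + 1) 0 hm (by omega),
            show (m - 0) - 0 = m by omega,
            show (0 : Nat) - (m - 0) = 0 by omega,
            pvAdvB_nolink_full n m jb ja m 0 (by omega) hm,
            show pvAdvance (pvNext n m false jb ja) 0 none = none from rfl,
            pvMeet_self _ (n + m + 1) none (by omega)]
      · rw [if_neg hm]
        simp only [pvIntersectionSum]
        rw [pvGetLength_none, pvAdvance_none, pvMeet_self _ (n + m + 1) none (by omega)]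

-- ===== VERDICT (by name: the statement is the Claim_ definition above) =====
theorem make_test_case_spec : Claim_equal_make_test_case := by
  intro v1 v2 ia ib _ hpre
  unfold Spec_make_test_case make_test_case make_test_case_alt
  dsimp only
  rw [pv_res_eq v1 v2 ia ib hpre]
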